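-- pv_equiv track=rewrite | github.com/Vedtion/tabel-kebenaran | main.py | teslist
-- ===== SOURCE A (Python) =====
-- def teslist(jum,num):
--     n=pow(2,jum)
--     b=j=pow(2,num)
--     out=[]
--     type=False
--     for i in range(n):
--         if(b == 0):
--             type=not(type)
--             b=j
--         if type:
--             out.append(1)
--         else:
--             out.append(0)
--         b=b-1
--     return out
-- ===== SOURCE B (Python) =====
-- def teslist(jum, num):
--     return [(i >> num) & 1 for i in range(2 ** jum)]
-- ===== Notes on version B (the rewrite author's own statement) =====
-- stated objective: simpler
-- what changed: replaces the per-element countdown/toggle state machine with the direct closed form (i >> num) & 1 for each index i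
-- outside the precondition, e.g. on teslist(2, -1): A returns [0, 0, 0, 0], B raises ValueError; on teslist(-1, 0): A raises TypeError, B raises TypeError
import Mathlib
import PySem

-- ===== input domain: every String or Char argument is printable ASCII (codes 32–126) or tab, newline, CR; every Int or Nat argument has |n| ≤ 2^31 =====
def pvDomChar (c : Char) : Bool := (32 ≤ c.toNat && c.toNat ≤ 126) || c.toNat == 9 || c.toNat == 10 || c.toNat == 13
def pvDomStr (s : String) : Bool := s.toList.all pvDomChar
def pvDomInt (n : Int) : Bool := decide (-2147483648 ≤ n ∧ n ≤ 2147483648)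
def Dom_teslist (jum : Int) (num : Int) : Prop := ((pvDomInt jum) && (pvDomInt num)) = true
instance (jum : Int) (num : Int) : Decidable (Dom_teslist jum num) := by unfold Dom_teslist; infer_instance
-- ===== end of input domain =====

-- B computes each element by the closed form (i >> num) & 1 instead of A's per-element countdown/toggle state machine.


-- ===== PORT A =====
-- one iteration of A's for-loop; the loop index (Python's `i`) is unused by the body
def teslistStep (j : Int) (s : Int × Bool × List Int) (_i : Int) : Int × Bool × List Int :=
  let b := s.1
  let ty := s.2.1
  let out := s.2.2
  let bt := if b == 0 then (j, !ty) else (b, ty)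
  let out := if bt.2 then out ++ [1] else out ++ [0]
  (bt.1 - 1, bt.2, out)

-- pow(2, e) ported as 2 ^ e.toNat: exact for the nonnegative exponents Pre_ admits (Python gives a float otherwise)
def teslist (jum : Int) (num : Int) : List Int :=
  let n : Int := 2 ^ jum.toNat
  let j : Int := 2 ^ num.toNat
  ((PySem.List.pyRange 0 n 1).foldl (teslistStep j) (j, false, [])).2.2

-- ===== PORT B =====
-- i >> num ported as i >>> num.toNat: exact for the nonnegative shifts Pre_ admits (Python raises ValueError otherwise)
def teslist_alt (jum : Int) (num : Int) : List Int :=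
  (PySem.List.pyRange 0 ((2:Int) ^ jum.toNat) 1).map (fun (i : Int) => PySem.Int.band (i >>> num.toNat) 1)

-- ===== PRECONDITION & SPEC =====
-- Pre_ excludes negative exponents: for jum < 0 A raises TypeError (range over a float); for num < 0 A's
-- all-zero output is an artefact of a float countdown that never hits 0, and B's natural right shift
-- itself raises ValueError there.
def Pre_teslist (jum : Int) (num : Int) : Prop := 0 ≤ jum ∧ 0 ≤ num
instance (jum : Int) (num : Int) : Decidable (Pre_teslist jum num) := by unfold Pre_teslist; infer_instance
def pvWitness_teslist : Int × Int := (3, 1)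

def Spec_teslist (jum : Int) (num : Int) (out : List Int) : Prop := out = teslist_alt jum num
instance (jum : Int) (num : Int) (out : List Int) : Decidable (Spec_teslist jum num out) := by unfold Spec_teslist; infer_instance

-- ===== CLAIM (what is proved, stated in full; the proofs are below) =====
def Claim_equal_teslist : Prop := ∀ (jum : Int) (num : Int), Dom_teslist jum num → Pre_teslist jum num → Spec_teslist jum num (teslist jum num)

-- ===== LEMMAS AND PROOFS =====

-- the common closed form of element i: (i // 2^num) % 2
def tesF (J i : Nat) : Int := ((i / J) % 2 : Nat)

-- A's loop state after k iterations, started from the normalized initial state (0, true, [])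
lemma invA (J : Nat) (hJ : 0 < J) : ∀ k : Nat,
    (List.range k).foldl (fun s (_ : Nat) => teslistStep (J : Int) s 0) ((0 : Int), true, ([] : List Int))
      = ((J : Int) - (((k + J - 1) % J : Nat) : Int) - 1,
         decide ((((k + J - 1) / J) % 2) = 0),
         (List.range k).map (tesF J)) := by
  intro k
  induction k with
  | zero =>
    simp [Nat.mod_eq_of_lt (by omega : J - 1 < J), Nat.div_eq_of_lt (by omega : J - 1 < J)]
    omega
  | succ k ih =>
    rw [List.range_succ, List.foldl_append, ih, List.map_append]
    obtain ⟨q, r, hk, hr⟩ : ∃ q r, k = J * q + r ∧ r < J :=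
      ⟨k / J, k % J, (Nat.div_add_mod k J).symm, Nat.mod_lt _ hJ⟩
    subst hk
    by_cases h0 : r = 0
    · subst h0
      have e1 : J * q + 0 + J - 1 = J * q + (J - 1) := by omega
      have e2 : J * q + 0 + 1 + J - 1 = J * (q + 1) := by rw [Nat.mul_succ]; omega
      rw [e1, e2, Nat.mul_add_mod, Nat.mul_mod_right, Nat.mul_add_div hJ,
        Nat.mul_div_cancel_left _ hJ,
        Nat.mod_eq_of_lt (by omega : J - 1 < J), Nat.div_eq_of_lt (by omega : J - 1 < J)]
      have hb : (J : Int) - ((J - 1 : Nat) : Int) - 1 = 0 := by omega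
      have hdiv : J * q / J = q := Nat.mul_div_cancel_left q hJ
      rcases Nat.even_or_odd q with hq | hq
      · have hq2 : q % 2 = 0 := Nat.even_iff.mp hq
        have h1 : (q + 1) % 2 = 1 := by omega
        simp [teslistStep, hb, tesF, hdiv, hq2, h1]
      · have hq2 : q % 2 = 1 := Nat.odd_iff.mp hq
        have h1 : (q + 1) % 2 = 0 := by omega
        simp [teslistStep, hb, tesF, hdiv, hq2, h1]
    · have e1 : J * q + r + J - 1 = J * (q + 1) + (r - 1) := by rw [Nat.mul_succ]; omega
      have e2 : J * q + r + 1 + J - 1 = J * (q + 1) + r := by rw [Nat.mul_succ]; omega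
      rw [e1, e2, Nat.mul_add_mod, Nat.mul_add_mod, Nat.mul_add_div hJ, Nat.mul_add_div hJ,
        Nat.mod_eq_of_lt (by omega : r - 1 < J), Nat.mod_eq_of_lt hr,
        Nat.div_eq_of_lt (by omega : r - 1 < J), Nat.div_eq_of_lt hr]
      have hb : ¬((J : Int) - ((r - 1 : Nat) : Int) - 1 = 0) := by omega
      have hdiv : (J * q + r) / J = q := by
        rw [Nat.mul_add_div hJ, Nat.div_eq_of_lt hr]; rfl
      rcases Nat.even_or_odd q with hq | hq
      · have hq2 : q % 2 = 0 := Nat.even_iff.mp hq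
        have h1 : (q + 1) % 2 = 1 := by omega
        simp [teslistStep, hb, tesF, hdiv, hq2, h1]
        omega
      · have hq2 : q % 2 = 1 := Nat.odd_iff.mp hq
        have h1 : (q + 1) % 2 = 0 := by omega
        simp [teslistStep, hb, tesF, hdiv, hq2, h1]
        omega

-- A's real initial state (j, False) and the normalized one (0, True) produce the same output list
lemma normA (J : Nat) (hJ : 0 < J) (m : Nat) :
    ((List.range m).foldl (fun s (_ : Nat) => teslistStep (J : Int) s 0) ((J : Int), false, [])).2.2
      = ((List.range m).foldl (fun s (_ : Nat) => teslistStep (J : Int) s 0) ((0 : Int), true, [])).2.2 := by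
  cases m with
  | zero => rfl
  | succ m =>
    have hstep : teslistStep (J : Int) ((J : Int), false, ([] : List Int)) 0
        = teslistStep (J : Int) ((0 : Int), true, ([] : List Int)) 0 := by
      have h : J ≠ 0 := by omega
      simp [teslistStep, h]
    rw [List.range_succ_eq_map, List.foldl_cons, List.foldl_cons]
    show ((List.map Nat.succ (List.range m)).foldl _ (teslistStep (J : Int) ((J : Int), false, []) 0)).2.2 = _
    rw [hstep]

-- A's output is the closed form
lemma teslist_eq_map (jum num : Int) :
    teslist jum num = (List.range (2 ^ jum.toNat)).map (tesF (2 ^ num.toNat)) := by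
  unfold teslist
  dsimp only
  have hJ : 0 < 2 ^ num.toNat := Nat.two_pow_pos _
  have hcN : ((2:Int) ^ jum.toNat) = ((2 ^ jum.toNat : Nat) : Int) := by push_cast; ring
  have hcM : ((2:Int) ^ num.toNat) = ((2 ^ num.toNat : Nat) : Int) := by push_cast; ring
  rw [hcN, hcM, PySem.List.pyRange_one, sub_zero, Int.toNat_natCast, List.foldl_map]
  have hfun : (fun (s : Int × Bool × List Int) (k : Nat) =>
      teslistStep ((2 ^ num.toNat : Nat) : Int) s ((0 : Int) + (k : Int)))
      = (fun s (_ : Nat) => teslistStep ((2 ^ num.toNat : Nat) : Int) s 0) := rfl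
  rw [hfun, normA _ hJ, invA _ hJ]

-- B's output is the closed form
lemma teslist_alt_eq_map (jum num : Int) :
    teslist_alt jum num = (List.range (2 ^ jum.toNat)).map (tesF (2 ^ num.toNat)) := by
  unfold teslist_alt
  have hcN : ((2:Int) ^ jum.toNat) = ((2 ^ jum.toNat : Nat) : Int) := by push_cast; ring
  rw [hcN, PySem.List.pyRange_one, sub_zero, Int.toNat_natCast, List.map_map]
  apply List.map_congr_left
  intro k _
  show PySem.Int.band (((0:Int) + (k : Int)) >>> num.toNat) 1 = tesF (2 ^ num.toNat) k
  rw [zero_add]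
  have h1 : ((k : Int)) >>> num.toNat = ((k >>> num.toNat : Nat) : Int) := by
    simp [Int.natCast_shiftRight]
  rw [h1, PySem.Int.band_of_nonneg (by positivity) (by norm_num)]
  simp only [Int.toNat_natCast, Int.toNat_one]
  rw [Nat.and_one_is_mod, Nat.shiftRight_eq_div_pow]
  rfl

-- ===== VERDICT (by name: the statement is the Claim_ definition above) =====
theorem teslist_spec : Claim_equal_teslist := by
  intro jum num _hd _hpre
  unfold Spec_teslist
  rw [teslist_eq_map, teslist_alt_eq_map]
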